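-- pv_equiv track=rewrite | github.com/FGG100y/lc-brain-gym | src/2024E-HWOD/进制转换_靠谱的车/script-mutli-skips.py | convert_to_actual_cost
-- ===== SOURCE A (Python) =====
-- def convert_to_actual_cost(n, skip_digits):
--     """根据跳过的数字计算实际费用"""
--     res = 0
--     base = 1
--     while n > 0:
--         last_digit = n % 10
--         n //= 10
--         # 计算实际数位，跳过定义的数字
--         skipped_count = sum(1 for d in skip_digits if d <= last_digit)
--         res += (last_digit - skipped_count) * base
--         base *= (10 - len(skip_digits))  # 更新进制为伪进制，例如跳过两个数字时是伪8进制
--     return res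
-- ===== SOURCE B (Python) =====
-- def _digits(n):
--     ds = []
--     while n > 0:
--         ds.append(n % 10)
--         n //= 10
--     ds.reverse()
--     return ds
--
--
-- def convert_to_actual_cost(n, skip_digits):
--     """根据跳过的数字计算实际费用"""
--     if n <= 0:
--         return 0
--     pbase = 10 - len(skip_digits)
--     res = 0
--     for d in _digits(n):
--         res = res * pbase + d - sum(1 for s in skip_digits if s <= d)
--     return res
-- ===== Notes on version B (the rewrite author's own statement) =====
-- stated objective: alternative
-- what changed: Replaces the LSB-first place-value loop with a growing base by a most-significant-first Horner accumulation over the digit list (res = res*pbase + adjusted digit), with an explicit n <= 0 guard.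
import Mathlib
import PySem

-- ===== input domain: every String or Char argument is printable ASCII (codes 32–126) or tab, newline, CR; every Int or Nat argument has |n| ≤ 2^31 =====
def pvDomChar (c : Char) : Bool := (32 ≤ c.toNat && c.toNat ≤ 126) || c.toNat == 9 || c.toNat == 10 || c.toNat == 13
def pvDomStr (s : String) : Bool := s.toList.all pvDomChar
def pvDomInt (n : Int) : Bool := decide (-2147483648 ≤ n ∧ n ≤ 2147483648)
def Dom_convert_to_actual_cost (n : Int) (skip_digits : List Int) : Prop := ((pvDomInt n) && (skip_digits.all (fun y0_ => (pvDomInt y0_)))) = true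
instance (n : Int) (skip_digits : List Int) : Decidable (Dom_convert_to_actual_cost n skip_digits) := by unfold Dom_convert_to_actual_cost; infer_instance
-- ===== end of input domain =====

-- B replaces A's LSB-first place-value loop with a growing base by a MSB-first Horner
-- accumulation over the digit list (objective: alternative decomposition, same cost).

-- termination helper (cited by the ports' decreasing_by)
theorem pvFloordiv10_toNat_lt (n : Int) (h : 0 < n) :
    (PySem.Int.floordiv n 10).toNat < n.toNat := by
  rw [PySem.Int.floordiv_eq_ediv_of_pos (by norm_num : (0:Int) < 10)]
  omega

-- ===== PORT A =====
-- A's while-loop: state (n, res, base), LSB first, base *= (10 - len(skip_digits))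
def pvLoopA (n res base : Int) (skip_digits : List Int) : Int :=
  if h : 0 < n then
    let last_digit := PySem.Int.mod n 10
    let n' := PySem.Int.floordiv n 10
    let skipped_count : Int := (skip_digits.countP (fun d => d ≤ last_digit) : Nat)
    pvLoopA n' (res + (last_digit - skipped_count) * base)
      (base * (10 - (skip_digits.length : Int))) skip_digits
  else res
termination_by n.toNat
decreasing_by exact pvFloordiv10_toNat_lt n h

def convert_to_actual_cost (n : Int) (skip_digits : List Int) : Int :=
  pvLoopA n 0 1 skip_digits

-- ===== PORT B =====
-- B's _digits: collect LSB digits, then reverse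
def pvDigitsLoop (n : Int) (ds : List Int) : List Int :=
  if h : 0 < n then
    pvDigitsLoop (PySem.Int.floordiv n 10) (ds ++ [PySem.Int.mod n 10])
  else ds
termination_by n.toNat
decreasing_by exact pvFloordiv10_toNat_lt n h

def pvDigits (n : Int) : List Int := (pvDigitsLoop n []).reverse

def convert_to_actual_cost_alt (n : Int) (skip_digits : List Int) : Int :=
  if n ≤ 0 then 0
  else
    let pbase : Int := 10 - (skip_digits.length : Int)
    (pvDigits n).foldl
      (fun res d => res * pbase + d - ((skip_digits.countP (fun s => s ≤ d) : Nat) : Int)) 0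

-- ===== PRECONDITION & SPEC =====
def Spec_convert_to_actual_cost (n : Int) (skip_digits : List Int) (out : Int) : Prop := out = convert_to_actual_cost_alt n skip_digits
instance (n : Int) (skip_digits : List Int) (out : Int) : Decidable (Spec_convert_to_actual_cost n skip_digits out) := by unfold Spec_convert_to_actual_cost; infer_instance

-- ===== CLAIM (what is proved, stated in full; the proofs are below) =====
def Claim_equal_convert_to_actual_cost : Prop := ∀ (n : Int) (skip_digits : List Int), Dom_convert_to_actual_cost n skip_digits → Spec_convert_to_actual_cost n skip_digits (convert_to_actual_cost n skip_digits)

-- ===== LEMMAS AND PROOFS =====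

-- reference value: the number n alone, skipping digits of skip, pseudo-base 10 - len(skip)
def pvVal (n : Int) (skip : List Int) : Int :=
  if h : 0 < n then
    let last := PySem.Int.mod n 10
    (last - ((skip.countP (fun d => d ≤ last) : Nat) : Int))
      + (10 - (skip.length : Int)) * pvVal (PySem.Int.floordiv n 10) skip
  else 0
termination_by n.toNat
decreasing_by exact pvFloordiv10_toNat_lt n h

theorem pvLoopA_eq_val (k : Nat) :
    ∀ (n : Int), n.toNat < k → ∀ (res base : Int) (skip : List Int),
      pvLoopA n res base skip = res + base * pvVal n skip := by
  induction k with
  | zero => intro n hn; omega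
  | succ k ih =>
    intro n hn res base skip
    rw [pvLoopA, pvVal]
    by_cases h : 0 < n
    · simp only [h, dif_pos]
      rw [ih _ (by have := pvFloordiv10_toNat_lt n h; omega)]
      ring
    · simp [h]

theorem pvDigitsLoop_acc (k : Nat) :
    ∀ (n : Int), n.toNat < k → ∀ (ds : List Int),
      pvDigitsLoop n ds = ds ++ pvDigitsLoop n [] := by
  induction k with
  | zero => intro n hn; omega
  | succ k ih =>
    intro n hn ds
    rw [pvDigitsLoop]; conv_rhs => rw [pvDigitsLoop]
    by_cases h : 0 < n
    · simp only [h, dif_pos]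
      have hlt : (PySem.Int.floordiv n 10).toNat < k := by
        have := pvFloordiv10_toNat_lt n h; omega
      rw [ih _ hlt, ih _ hlt ([] ++ [PySem.Int.mod n 10])]
      simp
    · simp [h]

theorem pvHorner_eq_val (k : Nat) :
    ∀ (n : Int), n.toNat < k → ∀ (skip : List Int),
      (pvDigits n).foldl
        (fun res d => res * (10 - (skip.length : Int)) + d
          - ((skip.countP (fun s => s ≤ d) : Nat) : Int)) 0 = pvVal n skip := by
  induction k with
  | zero => intro n hn; omega
  | succ k ih =>
    intro n hn skip
    rw [pvVal]
    by_cases h : 0 < n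
    · simp only [h, dif_pos]
      have hlt : (PySem.Int.floordiv n 10).toNat < k := by
        have := pvFloordiv10_toNat_lt n h; omega
      have hd : pvDigits n = pvDigits (PySem.Int.floordiv n 10) ++ [PySem.Int.mod n 10] := by
        unfold pvDigits
        rw [pvDigitsLoop]
        simp only [h, dif_pos]
        rw [pvDigitsLoop_acc (k := k) _ hlt]
        simp
      rw [hd, List.foldl_append, ih _ hlt]
      simp; ring
    · have : pvDigits n = [] := by unfold pvDigits; rw [pvDigitsLoop]; simp [h]
      simp [this, h]

-- ===== VERDICT (by name: the statement is the Claim_ definition above) =====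
theorem convert_to_actual_cost_spec : Claim_equal_convert_to_actual_cost := by
  intro n skip _
  unfold Spec_convert_to_actual_cost convert_to_actual_cost convert_to_actual_cost_alt
  rw [pvLoopA_eq_val (n.toNat + 1) n (by omega)]
  by_cases h : n ≤ 0
  · rw [pvVal]; simp [h, not_lt.mpr h]
  · simp only [h, if_false]
    rw [pvHorner_eq_val (n.toNat + 1) n (by omega)]
    ring
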